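-- pv_equiv track=rewrite | github.com/mihos3506/GoBP | gobp/mcp/batch_parser.py | _detect_unclosed_quote
-- ===== SOURCE A (Python) =====
-- def _detect_unclosed_quote(text: str) -> str | None:
--     """Return a quote character if ``text`` has an unclosed ``'`` or ``\"``, else ``None``."""
--     in_quote: str | None = None
--     for char in text:
--         if char in ('"', "'") and in_quote is None:
--             in_quote = char
--         elif char == in_quote:
--             in_quote = None
--     return in_quote
-- ===== SOURCE B (Python) =====
-- def _detect_unclosed_quote(text: str) -> str | None:
--     """Scan-and-jump: at a quote char c, jump to its closing match via str.find."""
--     i, n = 0, len(text)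
--     while i < n:
--         c = text[i]
--         if c in ('"', "'"):
--             j = text.find(c, i + 1)
--             if j == -1:
--                 return c
--             i = j + 1
--         else:
--             i += 1
--     return None
-- ===== Notes on version B (the rewrite author's own statement) =====
-- stated objective: simpler
-- what changed: Replaces the per-character quote-state machine with an index scan that, at each opening quote, jumps directly past its closing match using str.find and returns the opener immediately if none exists.
import Mathlib
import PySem

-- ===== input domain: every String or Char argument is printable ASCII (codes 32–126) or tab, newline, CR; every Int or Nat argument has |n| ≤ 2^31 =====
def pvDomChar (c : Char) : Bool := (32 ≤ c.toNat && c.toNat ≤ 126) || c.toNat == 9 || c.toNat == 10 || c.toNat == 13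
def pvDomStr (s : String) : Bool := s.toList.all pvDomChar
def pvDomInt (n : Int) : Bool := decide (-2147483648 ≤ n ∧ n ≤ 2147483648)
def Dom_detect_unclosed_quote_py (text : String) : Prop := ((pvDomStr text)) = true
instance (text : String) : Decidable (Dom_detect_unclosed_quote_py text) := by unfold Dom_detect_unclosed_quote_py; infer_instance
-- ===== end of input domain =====

-- B replaces A's per-character quote-state machine with an index scan that jumps
-- past each quoted span via find (here List.idxOf?); objective: simpler.

-- ===== PORT A =====
-- one step of A's loop body over the state `in_quote`
def pvStepA (st : Option Char) (c : Char) : Option Char :=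
  if (c = '"' ∨ c = '\'') ∧ st = none then some c
  else if some c = st then none
  else st

def detect_unclosed_quote_py (text : String) : Option String :=
  (text.toList.foldl pvStepA none).map (fun c => String.ofList [c])

-- ===== PORT B =====
-- Source B's while-loop: at a quote char c, `text.find(c, i+1)` = idxOf? on the rest;
-- `j == -1` is the `none` case; otherwise resume just past the closing quote.
def pvScanB : List Char → Option Char
  | [] => none
  | c :: rest =>
    if c = '"' ∨ c = '\'' then
      match List.idxOf? c rest with
      | none => some c
      | some j => pvScanB (rest.drop (j + 1))
    else pvScanB rest
termination_by l => l.length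
decreasing_by
  · simp only [List.length_drop, List.length_cons]; omega
  · simp

def detect_unclosed_quote_py_alt (text : String) : Option String :=
  (pvScanB text.toList).map (fun c => String.ofList [c])

-- ===== PRECONDITION & SPEC =====
def Spec_detect_unclosed_quote_py (text : String) (out : Option String) : Prop := out = detect_unclosed_quote_py_alt text
instance (text : String) (out : Option String) : Decidable (Spec_detect_unclosed_quote_py text out) := by unfold Spec_detect_unclosed_quote_py; infer_instance

-- ===== CLAIM (what is proved, stated in full; the proofs are below) =====
def Claim_equal_detect_unclosed_quote_py : Prop := ∀ (text : String), Dom_detect_unclosed_quote_py text → Spec_detect_unclosed_quote_py text (detect_unclosed_quote_py text)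

-- ===== LEMMAS AND PROOFS =====

-- Inside a quote `q`, A ignores everything until the first `q`, then resumes in state none;
-- if `q` never reappears, the state stays `some q` to the end.
theorem pv_foldl_some (q : Char) (l : List Char) :
    l.foldl pvStepA (some q) =
      (match List.idxOf? q l with
       | none => some q
       | some j => (l.drop (j + 1)).foldl pvStepA none) := by
  induction l with
  | nil => simp [List.idxOf?]
  | cons c rest ih =>
    by_cases hc : c = q
    · subst hc
      simp [List.idxOf?, List.findIdx?_cons, pvStepA]
    · have hq : List.idxOf? q (c :: rest) = (List.idxOf? q rest).map (· + 1) := by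
        simp [List.idxOf?, List.findIdx?_cons, beq_iff_eq, hc]
      rw [List.foldl_cons]
      have hstep : pvStepA (some q) c = some q := by
        simp [pvStepA, hc]
      rw [hstep, ih, hq]
      cases List.idxOf? q rest with
      | none => rfl
      | some j => simp [List.drop_succ_cons]

theorem pv_scan_eq (l : List Char) : l.foldl pvStepA none = pvScanB l := by
  induction l using pvScanB.induct with
  | case1 => simp [pvScanB]
  | case2 c rest hq hfind =>
    rw [List.foldl_cons]
    have hstep : pvStepA none c = some c := by
      rcases hq with h | h <;> simp [pvStepA, h]
    rw [hstep, pv_foldl_some, hfind]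
    simp [pvScanB, hq, hfind]
  | case3 c rest hq j hfind ih =>
    rw [List.foldl_cons]
    have hstep : pvStepA none c = some c := by
      rcases hq with h | h <;> simp [pvStepA, h]
    have hrhs : pvScanB (c :: rest) = pvScanB (rest.drop (j + 1)) := by
      rw [pvScanB]; simp [hq, hfind]
    rw [hstep, pv_foldl_some, hfind]
    exact ih.trans hrhs.symm
  | case4 c rest hq ih =>
    rw [List.foldl_cons]
    have hstep : pvStepA none c = none := by
      simp [pvStepA, hq]
    rw [hstep, ih]
    simp [pvScanB, hq]

-- ===== VERDICT (by name: the statement is the Claim_ definition above) =====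
theorem detect_unclosed_quote_py_spec : Claim_equal_detect_unclosed_quote_py := by
  intro text _
  unfold Spec_detect_unclosed_quote_py detect_unclosed_quote_py detect_unclosed_quote_py_alt
  rw [pv_scan_eq]
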